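-- pv_equiv track=rewrite | github.com/alanfrancoa/taller-integrador | Ejercicios/04-numeros-array/05-number-to-array.py | nuevoArray
-- ===== SOURCE A (Python) =====
-- def nuevoArray (n):
--     resultado = []
--
--     for item in range(n):
--         if item % 2 == 0:
--             resultado.append(1)
--         else:
--             resultado.append(-1)
--     return resultado
-- ===== SOURCE B (Python) =====
-- def nuevoArray(n):
--     # Tile the two-element pattern and truncate, instead of a per-index loop with a parity branch.
--     return ([1, -1] * ((n + 1) // 2))[:n]
-- ===== Notes on version B (the rewrite author's own statement) =====
-- stated objective: idiomatic
-- what changed: Replaces the per-index loop with a parity branch by tiling the pattern [1, -1] enough times and slicing the result to length n.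
import Mathlib
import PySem

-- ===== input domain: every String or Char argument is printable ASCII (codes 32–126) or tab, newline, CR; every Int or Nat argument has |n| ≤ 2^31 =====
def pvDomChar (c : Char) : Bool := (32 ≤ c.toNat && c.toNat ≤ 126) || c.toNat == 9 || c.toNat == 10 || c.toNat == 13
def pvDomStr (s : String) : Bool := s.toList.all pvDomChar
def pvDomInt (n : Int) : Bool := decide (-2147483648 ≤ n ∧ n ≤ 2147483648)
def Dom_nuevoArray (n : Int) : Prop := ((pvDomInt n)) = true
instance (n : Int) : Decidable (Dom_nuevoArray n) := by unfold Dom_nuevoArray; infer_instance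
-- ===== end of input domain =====

-- B tiles the pattern [1,-1] and slices to length n instead of looping with a parity branch.


-- ===== PORT A =====
def nuevoArray (n : Int) : List Int :=
  (PySem.List.pyRange 0 n 1).foldl
    (fun resultado item =>
      if PySem.Int.mod item 2 == 0 then resultado ++ [(1 : Int)] else resultado ++ [(-1 : Int)])
    []

-- ===== PORT B =====
def nuevoArray_alt (n : Int) : List Int :=
  PySem.List.slice
    (List.flatten (List.replicate (PySem.Int.floordiv (n + 1) 2).toNat ([1, -1] : List Int)))
    none (some n)

-- ===== PRECONDITION & SPEC =====
def Spec_nuevoArray (n : Int) (out : List Int) : Prop := out = nuevoArray_alt n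
instance (n : Int) (out : List Int) : Decidable (Spec_nuevoArray n out) := by unfold Spec_nuevoArray; infer_instance

-- ===== CLAIM (what is proved, stated in full; the proofs are below) =====
def Claim_equal_nuevoArray : Prop := ∀ (n : Int), Dom_nuevoArray n → Spec_nuevoArray n (nuevoArray n)

-- ===== LEMMAS AND PROOFS =====

-- A's loop appends one element per item: it is a map.
theorem pvFoldlMap (xs : List Int) (acc : List Int) :
    xs.foldl
      (fun resultado item =>
        if PySem.Int.mod item 2 == 0 then resultado ++ [(1 : Int)] else resultado ++ [(-1 : Int)])
      acc
    = acc ++ xs.map (fun item => if PySem.Int.mod item 2 == 0 then (1 : Int) else -1) := by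
  induction xs generalizing acc with
  | nil => simp
  | cons x xs ih =>
    simp only [List.foldl_cons, List.map_cons, ih]
    split <;> simp

-- The tiled-and-truncated pattern equals the parity map, for every natural length m.
theorem pvKey (m : Nat) :
    List.take m (List.flatten (List.replicate ((m + 1) / 2) ([1, -1] : List Int)))
      = (List.range m).map (fun k => if k % 2 = 0 then (1 : Int) else -1) := by
  induction m using Nat.twoStepInduction with
  | zero => simp
  | one => decide
  | more m ih _ =>
    have h2 : (m + 2 + 1) / 2 = (m + 1) / 2 + 1 := by omega
    rw [h2, List.replicate_succ, List.flatten_cons]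
    have hr : List.range (m + 2) = 0 :: 1 :: (List.range m).map (fun k => k + 1 + 1) := by
      rw [List.range_succ_eq_map, List.range_succ_eq_map, List.map_cons, List.map_map]
      rfl
    rw [hr]
    simp only [List.map_cons, List.map_map]
    have : ((List.range m).map ((fun k => if k % 2 = 0 then (1 : Int) else -1) ∘ fun k => k + 1 + 1))
        = (List.range m).map (fun k => if k % 2 = 0 then (1 : Int) else -1) := by
      apply List.map_congr_left
      intro k _
      simp only [Function.comp]
      have : (k + 1 + 1) % 2 = k % 2 := by omega
      rw [this]
    rw [this, ← ih]
    rfl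

-- ===== VERDICT (by name: the statement is the Claim_ definition above) =====
theorem nuevoArray_spec : Claim_equal_nuevoArray := by
  intro n _
  unfold Spec_nuevoArray nuevoArray nuevoArray_alt
  rcases (by omega : n ≤ 0 ∨ 0 < n) with hn | hn
  · -- n ≤ 0: both sides are empty
    rw [PySem.List.pyRange_one_eq_nil hn]
    have hfd : PySem.Int.floordiv (n + 1) 2 < 1 :=
      (PySem.Int.floordiv_lt_iff_lt_mul (by omega)).mpr (by omega)
    have : (PySem.Int.floordiv (n + 1) 2).toNat = 0 := by omega
    rw [this]
    simp [PySem.List.slice]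
  · -- n > 0: n = ↑m
    obtain ⟨m, rfl⟩ : ∃ m : Nat, n = (m : Int) := ⟨n.toNat, by omega⟩
    have hfd : PySem.Int.floordiv ((m : Int) + 1) 2 = ((m + 1) / 2 : Nat) := by
      have := PySem.Int.floordiv_natCast (m + 1) 2
      push_cast at this ⊢
      exact this
    rw [hfd, PySem.List.slice_to_natCast, Int.toNat_natCast, pvKey,
        PySem.List.pyRange_one, pvFoldlMap]
    simp only [Int.sub_zero, Int.toNat_natCast, List.nil_append, List.map_map]
    apply List.map_congr_left
    intro k _
    simp only [Function.comp]
    have : PySem.Int.mod (0 + (k : Int)) 2 = ((k % 2 : Nat) : Int) := by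
      rw [Int.zero_add]
      exact_mod_cast PySem.Int.mod_natCast k 2
    rw [this]
    rcases Nat.mod_two_eq_zero_or_one k with h | h <;> simp [h]
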